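-- pv_equiv track=rewrite | github.com/KIParla/tools | normalize.py | check_normal_parentheses
-- ===== SOURCE A (Python) =====
-- def check_normal_parentheses(annotation: str, open_char: str, close_char: str) -> bool:
--     """Return True if open_char/close_char pairs are balanced and non-nested."""
--     is_open = False
--     for ch in annotation:
--         if ch == open_char:
--             if is_open:
--                 return False
--             is_open = True
--         elif ch == close_char:
--             if not is_open:
--                 return False
--             is_open = False
--     return not is_open
-- ===== SOURCE B (Python) =====
-- def check_normal_parentheses(annotation: str, open_char: str, close_char: str) -> bool:
--     """Return True if open_char/close_char pairs are balanced and non-nested."""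
--     relevant = [ch for ch in annotation if ch == open_char or ch == close_char]
--     if len(relevant) % 2 != 0:
--         return False
--     return all((ch == open_char) == (i % 2 == 0) for i, ch in enumerate(relevant))
-- ===== Notes on version B (the rewrite author's own statement) =====
-- stated objective: simpler
-- what changed: Replaces A's incremental is_open toggle with early returns by a build-then-verify pass: collect the relevant characters, then check even length and that positions alternate open/close by index parity.
import Mathlib
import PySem

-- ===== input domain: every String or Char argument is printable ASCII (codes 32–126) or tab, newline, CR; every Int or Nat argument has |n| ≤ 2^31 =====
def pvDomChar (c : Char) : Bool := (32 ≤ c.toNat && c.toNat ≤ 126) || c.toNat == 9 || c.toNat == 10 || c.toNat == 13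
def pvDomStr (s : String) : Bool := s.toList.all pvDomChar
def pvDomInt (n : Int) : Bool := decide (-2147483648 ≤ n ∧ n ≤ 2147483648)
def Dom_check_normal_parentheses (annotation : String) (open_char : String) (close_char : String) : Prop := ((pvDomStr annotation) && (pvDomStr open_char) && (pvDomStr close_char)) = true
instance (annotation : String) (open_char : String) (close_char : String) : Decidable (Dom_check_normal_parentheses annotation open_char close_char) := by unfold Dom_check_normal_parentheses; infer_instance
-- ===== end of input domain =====

-- B replaces A's incremental is_open state machine with a build-then-verify pass over the
-- filtered relevant characters (even length + index-parity alternation); objective: simpler.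

-- ===== PORT A =====
-- A's for-loop with early returns, as structural recursion over the characters with the is_open flag.
def cnpLoopA (open_char : String) (close_char : String) : List Char → Bool → Bool
  | [], isOpen => !isOpen
  | ch :: rest, isOpen =>
    if String.mk [ch] == open_char then
      if isOpen then false else cnpLoopA open_char close_char rest true
    else if String.mk [ch] == close_char then
      if !isOpen then false else cnpLoopA open_char close_char rest false
    else cnpLoopA open_char close_char rest isOpen

def check_normal_parentheses (annotation : String) (open_char : String) (close_char : String) : Bool :=
  cnpLoopA open_char close_char annotation.toList false

-- ===== PORT B =====
def check_normal_parentheses_alt (annotation : String) (open_char : String) (close_char : String) : Bool :=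
  let relevant := annotation.toList.filter
    (fun ch => String.mk [ch] == open_char || String.mk [ch] == close_char)
  if relevant.length % 2 != 0 then false
  else relevant.zipIdx.all (fun p => (String.mk [p.1] == open_char) == (decide (p.2 % 2 = 0)))

-- ===== PRECONDITION & SPEC =====
def Spec_check_normal_parentheses (annotation : String) (open_char : String) (close_char : String) (out : Bool) : Prop := out = check_normal_parentheses_alt annotation open_char close_char
instance (annotation : String) (open_char : String) (close_char : String) (out : Bool) : Decidable (Spec_check_normal_parentheses annotation open_char close_char out) := by unfold Spec_check_normal_parentheses; infer_instance

-- ===== CLAIM (what is proved, stated in full; the proofs are below) =====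
def Claim_equal_check_normal_parentheses : Prop := ∀ (annotation : String) (open_char : String) (close_char : String), Dom_check_normal_parentheses annotation open_char close_char → Spec_check_normal_parentheses annotation open_char close_char (check_normal_parentheses annotation open_char close_char)

-- ===== LEMMAS AND PROOFS =====

-- Pattern check over an already-filtered list: every element is treated as open iff it equals
-- open_char (open takes priority); isOpen = "next relevant char must be a close".
def cnpPat (open_char : String) : List Char → Bool → Bool
  | [], isOpen => !isOpen
  | ch :: rest, isOpen =>
    if String.mk [ch] == open_char then
      if isOpen then false else cnpPat open_char rest true
    else
      if isOpen then cnpPat open_char rest false else false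

theorem cnpLoopA_eq_pat (oc cc : String) :
    ∀ (cs : List Char) (b : Bool),
      cnpLoopA oc cc cs b =
        cnpPat oc (cs.filter (fun ch => String.mk [ch] == oc || String.mk [ch] == cc)) b := by
  intro cs
  induction cs with
  | nil => intro b; rfl
  | cons c rest ih =>
    intro b
    by_cases ho : String.mk [c] == oc
    · simp [cnpLoopA, cnpPat, List.filter, ho]
      cases b <;> simp [cnpPat, ho, ih]
    · by_cases hc : String.mk [c] == cc
      · simp [cnpLoopA, cnpPat, List.filter, ho, hc]
        cases b <;> simp [cnpPat, ho, ih]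
      · simp [cnpLoopA, cnpPat, List.filter, ho, hc, ih]

theorem cnpPat_eq_parity (oc : String) :
    ∀ (rel : List Char) (n : Nat),
      cnpPat oc rel (decide (n % 2 = 1)) =
        ((decide ((rel.length + n) % 2 = 0)) &&
          (rel.zipIdx n).all (fun p => (String.mk [p.1] == oc) == (decide (p.2 % 2 = 0)))) := by
  intro rel
  induction rel with
  | nil =>
    intro n
    by_cases hb : n % 2 = 1 <;> simp [cnpPat, hb] <;> omega
  | cons c rest ih =>
    intro n
    have harith : rest.length + 1 + n = rest.length + (n + 1) := by omega
    by_cases ho : String.mk [c] == oc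
    · by_cases hb : n % 2 = 1
      · -- open element at an odd position: both sides are false
        simp [cnpPat, hb, ho, List.zipIdx_cons]
      · have hn0 : n % 2 = 0 := by omega
        have h1 : (n + 1) % 2 = 1 := by omega
        have := ih (n + 1)
        rw [h1] at this
        norm_num at this
        simp [cnpPat, ho, List.zipIdx_cons, hn0, this, harith]
    · by_cases hb : n % 2 = 1
      · have h0 : (n + 1) % 2 = 0 := by omega
        have := ih (n + 1)
        rw [h0] at this
        norm_num at this
        simp [cnpPat, hb, ho, List.zipIdx_cons, this, harith]
      · -- close element at an even position: both sides are false
        have hn0 : n % 2 = 0 := by omega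
        simp [cnpPat, ho, List.zipIdx_cons, hn0]

-- ===== VERDICT (by name: the statement is the Claim_ definition above) =====
theorem check_normal_parentheses_spec : Claim_equal_check_normal_parentheses := by
  intro annotation oc cc _
  unfold Spec_check_normal_parentheses check_normal_parentheses check_normal_parentheses_alt
  rw [cnpLoopA_eq_pat]
  have h := cnpPat_eq_parity oc
    (annotation.toList.filter (fun ch => String.mk [ch] == oc || String.mk [ch] == cc)) 0
  simp at h
  rw [h]
  set rel := annotation.toList.filter (fun ch => String.mk [ch] == oc || String.mk [ch] == cc)
  by_cases hlen : rel.length % 2 = 0 <;> simp [hlen]
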